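-- pv_equiv track=rewrite | github.com/Haidram/codeforces_prblm_solutions | napoleon cake.py | solve
-- ===== SOURCE A (Python) =====
-- def solve(n, arr):
--     arr.reverse()
--     power = 0
--     s = []
--     for i in arr:
--         if i > power:
--             power = i
--         if power > 0:
--             s.append('1')
--             power -= 1
--         else:
--             s.append('0')
--
--     s.reverse()
--     return " ".join(s)
-- ===== SOURCE B (Python) =====
-- def solve(n, arr):
--     arr.reverse()
--     m = len(arr)
--     diff = [0] * (m + 1)
--     for k, v in enumerate(arr):
--         if v > 0:
--             diff[k] = diff[k] + 1
--             e = min(k + v, m)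
--             diff[e] = diff[e] - 1
--     out = []
--     run = 0
--     for k in range(m):
--         run = run + diff[k]
--         out.append('1' if run > 0 else '0')
--     out.reverse()
--     return " ".join(out)
-- ===== Notes on version B (the rewrite author's own statement) =====
-- stated objective: alternative
-- what changed: Replaced the greedy decrementing power counter with a difference array over cream intervals plus a prefix-sum scan (interval-stabbing formulation), keeping the same in-place reversal side effect.
import Mathlib
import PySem

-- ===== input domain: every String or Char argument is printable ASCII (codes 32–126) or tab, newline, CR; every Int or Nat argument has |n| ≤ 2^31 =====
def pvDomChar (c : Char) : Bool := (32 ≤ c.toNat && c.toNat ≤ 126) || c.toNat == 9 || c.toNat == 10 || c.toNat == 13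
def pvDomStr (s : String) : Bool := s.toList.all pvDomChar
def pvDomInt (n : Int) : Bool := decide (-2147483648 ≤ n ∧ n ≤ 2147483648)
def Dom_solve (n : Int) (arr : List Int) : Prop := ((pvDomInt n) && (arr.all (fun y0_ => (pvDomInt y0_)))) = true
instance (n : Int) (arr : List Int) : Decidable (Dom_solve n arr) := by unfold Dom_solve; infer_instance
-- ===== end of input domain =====

-- B replaces A's greedy decrementing power counter by a difference array over the cream
-- intervals plus a prefix-sum scan (alternative algorithm, same cost); both programs also
-- reverse the argument list in place — that side effect is identical in A and B, and the
-- equivalence proved here is about the return value.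


-- ===== PORT A =====
-- A's loop body: power = max-update via the `if i > power` branch, emit '1'/'0', decrement.
def solveStep (st : Int × List String) (i : Int) : Int × List String :=
  let power := if i > st.1 then i else st.1
  if power > 0 then (power - 1, st.2 ++ ["1"]) else (power, st.2 ++ ["0"])

def solve (n : Int) (arr : List Int) : String :=
  let arr' := arr.reverse
  let st := arr'.foldl solveStep (0, [])
  PySem.Str.join " " st.2.reverse

-- ===== PORT B =====
-- diff[k] += 1 ; diff[e] -= 1 — these Python indexes are nonnegative and in range
-- (0 ≤ k < m, 0 ≤ e ≤ m < len(diff)), so List.getD / List.set is exact here.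
def diffStep (m : Nat) (d : List Int) (kv : Int × Int) : List Int :=
  if kv.2 > 0 then
    let i1 := kv.1.toNat
    let e := (min (kv.1 + kv.2) (m : Int)).toNat
    let d1 := d.set i1 (d.getD i1 0 + 1)
    d1.set e (d1.getD e 0 - 1)
  else d

def scanStep (diff : List Int) (st : Int × List String) (k : Nat) : Int × List String :=
  let run := st.1 + diff.getD k 0
  (run, st.2 ++ [if run > 0 then "1" else "0"])

def solve_alt (n : Int) (arr : List Int) : String :=
  let arr' := arr.reverse
  let m := arr'.length
  let diff := (PySem.List.enumerate arr' 0).foldl (diffStep m) (List.replicate (m + 1) 0)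
  let st := (List.range m).foldl (scanStep diff) (0, [])
  PySem.Str.join " " st.2.reverse

-- ===== PRECONDITION & SPEC =====
def Spec_solve (n : Int) (arr : List Int) (out : String) : Prop := out = solve_alt n arr
instance (n : Int) (arr : List Int) (out : String) : Decidable (Spec_solve n arr out) := by unfold Spec_solve; infer_instance

-- ===== CLAIM (what is proved, stated in full; the proofs are below) =====
def Claim_equal_solve : Prop := ∀ (n : Int) (arr : List Int), Dom_solve n arr → Spec_solve n arr (solve n arr)

-- ===== LEMMAS AND PROOFS =====

-- A-side reference: the emitted bits as a standalone recursion
def spineA : List Int → Int → List String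
  | [], _ => []
  | v :: rest, p =>
    let p' := if v > p then v else p
    if p' > 0 then "1" :: spineA rest (p' - 1) else "0" :: spineA rest p'

-- "some poured cream reaches position k": ∃ j ≤ k with k < j + l[j]
def condExists (l : List Int) (k : Nat) : Bool :=
  (List.range (k + 1)).any (fun j => decide ((k : Int) < (j : Int) + l.getD j 0))

-- prefix sum of the first a entries of a list of Ints
def preSum (d : List Int) (a : Nat) : Int := ∑ i ∈ Finset.range a, d.getD i 0

-- weight one enumerate event contributes to preSum a of the difference array
def wgt (m : Nat) (e : Int × Int) (a : Nat) : Int :=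
  if 0 < e.2 then
    (if e.1.toNat < a then (1 : Int) else 0) - (if (min (e.1 + e.2) (m : Int)).toNat < a then 1 else 0)
  else 0

-- B-side reference: the prefix-sum scan as a standalone recursion
def scanList (diff : List Int) : List Nat → Int → List String
  | [], _ => []
  | k :: ks, r =>
    let r' := r + diff.getD k 0
    (if r' > 0 then "1" else "0") :: scanList diff ks r'

theorem foldA_acc (l : List Int) (p : Int) (acc : List String) :
    (l.foldl solveStep (p, acc)).2 = acc ++ spineA l p := by
  induction l generalizing p acc with
  | nil => simp [spineA]
  | cons v rest ih =>
    simp only [List.foldl_cons, solveStep, spineA]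
    by_cases h : (if v > p then v else p) > 0 <;> simp [h, ih]

theorem spineA_length (l : List Int) (p : Int) : (spineA l p).length = l.length := by
  induction l generalizing p with
  | nil => simp [spineA]
  | cons v rest ih =>
    simp only [spineA]
    split <;> split <;> simp [ih]

theorem condExists_succ (v : Int) (rest : List Int) (k : Nat) :
    condExists (v :: rest) (k + 1) = (decide ((k : Int) + 1 < v) || condExists rest k) := by
  unfold condExists
  rw [List.range_succ_eq_map, List.any_cons, List.any_map]
  congr 1
  · simp only [List.getD_cons_zero, decide_eq_decide]
    push_cast; omega
  · apply List.any_congr rfl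
    intro j
    simp only [Function.comp, List.getD_cons_succ, decide_eq_decide]
    push_cast; omega

theorem spineA_get (l : List Int) (p : Int) (k : Nat) (hk : k < l.length) (hp : 0 ≤ p) :
    (spineA l p)[k]? = some (if ((k : Int) < p || condExists l k) then "1" else "0") := by
  induction l generalizing p k with
  | nil => simp at hk
  | cons v rest ih =>
    cases k with
    | zero =>
      have h0 : condExists (v :: rest) 0 = decide ((0:Int) < v) := by
        simp [condExists]
      simp only [spineA, h0]
      by_cases h : (if v > p then v else p) > 0
      · have : (decide ((0:Int) < p) || decide ((0:Int) < v)) = true := by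
          split_ifs at h <;> simp <;> omega
        simp only [Nat.cast_zero] at this ⊢
        simp [h, this]
      · have : (decide ((0:Int) < p) || decide ((0:Int) < v)) = false := by
          split_ifs at h <;> simp <;> omega
        simp only [Nat.cast_zero] at this ⊢
        simp [h, this]
    | succ k =>
      have hk' : k < rest.length := by simpa using hk
      simp only [spineA]
      by_cases h : (if v > p then v else p) > 0
      · have hp' : 0 ≤ (if v > p then v else p) - 1 := by split_ifs at h ⊢ <;> omega
        rw [if_pos h]
        simp only [List.getElem?_cons_succ]
        rw [ih ((if v > p then v else p) - 1) k hk' hp', condExists_succ]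
        congr 2
        have hiff : ((k:Int) < (if v > p then v else p) - 1) ↔ ((k:Int)+1 < p ∨ (k:Int)+1 < v) := by
          split_ifs <;> omega
        by_cases hc : condExists rest k = true <;>
          · push_cast
            simp only [hc, Bool.or_true, Bool.or_false,
              decide_eq_true_eq] <;> simp [hiff]
      · obtain ⟨hp0, hv0⟩ : p = 0 ∧ v ≤ 0 := by split_ifs at h <;> omega
        have heq : (if v > p then v else p) = p := by rw [if_neg]; omega
        rw [if_neg h, heq]
        simp only [List.getElem?_cons_succ]
        rw [ih p k hk' hp, condExists_succ]
        congr 2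
        push_cast
        have h1 : ¬ ((k:Int) < p) := by omega
        have h2 : ¬ ((k:Int) + 1 < p) := by omega
        have h3 : ¬ ((k:Int) + 1 < v) := by omega
        simp [h1, h2, h3]

-- single-point bump under a prefix sum
theorem preSum_set (d : List Int) (j : Nat) (c : Int) (a : Nat) (hj : j < d.length) :
    preSum (d.set j (d.getD j 0 + c)) a = preSum d a + (if j < a then c else 0) := by
  unfold preSum
  have hgd : ∀ i, (d.set j (d.getD j 0 + c)).getD i 0 =
      d.getD i 0 + (if i = j then c else 0) := by
    intro i
    by_cases hij : i = j
    · subst hij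
      simp [List.getD, hj]
    · simp [List.getD, List.getElem?_set_ne (by omega : j ≠ i), hij]
  simp only [hgd, Finset.sum_add_distrib]
  congr 1
  rw [Finset.sum_ite_eq' (Finset.range a) j (fun _ => c)]
  simp [Finset.mem_range]

theorem preSum_fold (m : Nat) (es : List (Int × Int)) (d : List Int) (a : Nat)
    (hlen : d.length = m + 1)
    (hok : ∀ e ∈ es, 0 < e.2 → 0 ≤ e.1 ∧ e.1 ≤ (m : Int)) :
    preSum (es.foldl (diffStep m) d) a = preSum d a + (es.map (fun e => wgt m e a)).sum := by
  induction es generalizing d with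
  | nil => simp
  | cons e es ih =>
    simp only [List.foldl_cons, List.map_cons, List.sum_cons]
    by_cases he : e.2 > 0
    · obtain ⟨h0, hm⟩ := hok e (by simp) he
      have hi1 : e.1.toNat < d.length := by omega
      have hd1len : (d.set e.1.toNat (d.getD e.1.toNat 0 + 1)).length = d.length := by
        simp
      have he2 : (min (e.1 + e.2) (m : Int)).toNat < d.length := by omega
      have hstep : diffStep m d e =
          ((d.set e.1.toNat (d.getD e.1.toNat 0 + 1)).set (min (e.1 + e.2) (m : Int)).toNat
            (((d.set e.1.toNat (d.getD e.1.toNat 0 + 1)).getD (min (e.1 + e.2) (m : Int)).toNat 0) + (-1))) := by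
        simp only [diffStep, if_pos he]
        ring_nf
      rw [hstep, ih _ (by simp [hlen]) (fun x hx => hok x (by simp [hx]))]
      rw [preSum_set _ _ _ _ (by rw [hd1len]; exact he2), preSum_set _ _ _ _ hi1]
      simp only [wgt, if_pos he]
      split_ifs <;> ring
    · simp only [diffStep, if_neg he]
      rw [ih _ hlen (fun x hx => hok x (by simp [hx]))]
      simp only [wgt, if_neg he]
      ring

-- sum of a list of nonnegative Ints is positive iff some element is
theorem sum_pos_iff_exists (l : List Int) (h : ∀ x ∈ l, 0 ≤ x) :
    0 < l.sum ↔ ∃ x ∈ l, 0 < x := by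
  induction l with
  | nil => simp
  | cons x xs ih =>
    have hx := h x (by simp)
    have hxs : ∀ y ∈ xs, 0 ≤ y := fun y hy => h y (by simp [hy])
    have hs : 0 ≤ xs.sum := List.sum_nonneg hxs
    simp only [List.sum_cons, List.mem_cons]
    constructor
    · intro hpos
      by_cases h1 : 0 < x
      · exact ⟨x, Or.inl rfl, h1⟩
      · have : 0 < xs.sum := by omega
        obtain ⟨y, hy, hy'⟩ := (ih hxs).mp this
        exact ⟨y, Or.inr hy, hy'⟩
    · rintro ⟨y, hy | hy, hy'⟩
      · subst hy; omega
      · have := (ih hxs).mpr ⟨y, hy, hy'⟩; omega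

theorem foldScan (diff : List Int) (ks : List Nat) (r : Int) (acc : List String) :
    (ks.foldl (scanStep diff) (r, acc)).2 = acc ++ scanList diff ks r := by
  induction ks generalizing r acc with
  | nil => simp [scanList]
  | cons k ks ih => simp [scanList, scanStep, ih]

theorem scanList_range' (diff : List Int) (b a : Nat) (r : Int) (hr : r = preSum diff a) :
    scanList diff (List.range' a b) r =
      (List.range' a b).map (fun k => if 0 < preSum diff (k + 1) then "1" else "0") := by
  induction b generalizing a r with
  | zero => simp [scanList]
  | succ b ih =>
    rw [List.range'_succ]
    simp only [scanList, List.map_cons]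
    have hr' : r + diff.getD a 0 = preSum diff (a + 1) := by
      rw [hr]; unfold preSum; rw [Finset.sum_range_succ]
    rw [hr']
    rw [ih (a + 1) _ rfl]

-- the prefix sums of B's difference array count the creams covering position k
theorem preSum_diff_pos_iff (l : List Int) (k : Nat) (hk : k < l.length) :
    (0 < preSum ((PySem.List.enumerate l 0).foldl (diffStep l.length) (List.replicate (l.length + 1) 0)) (k + 1)) ↔
      condExists l k = true := by
  set m := l.length with hm
  have hok : ∀ e ∈ PySem.List.enumerate l 0, 0 < e.2 → 0 ≤ e.1 ∧ e.1 ≤ (m : Int) := by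
    intro e he _
    obtain ⟨j, hj, rfl⟩ := (PySem.List.mem_enumerate_iff _ _ _).mp he
    have hjm : j < m := hj
    constructor <;> push_cast <;> omega
  rw [preSum_fold m _ _ (k + 1) (by simp) hok]
  have hz : preSum (List.replicate (m + 1) (0:Int)) (k + 1) = 0 := by
    unfold preSum
    have : ∀ i, (List.replicate (m + 1) (0:Int)).getD i 0 = 0 := by
      intro i; by_cases hi : i < m + 1 <;> simp [List.getD, hi]
    simp only [this, Finset.sum_const, smul_zero]
  rw [hz, zero_add]
  have hnonneg : ∀ x ∈ (PySem.List.enumerate l 0).map (fun e => wgt m e (k + 1)), 0 ≤ x := by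
    intro x hx
    obtain ⟨e, he, rfl⟩ := List.mem_map.mp hx
    obtain ⟨j, hj, rfl⟩ := (PySem.List.mem_enumerate_iff _ _ _).mp he
    have hjm : j < l.length := hj
    simp only [wgt, zero_add]
    split_ifs <;> omega
  rw [sum_pos_iff_exists _ hnonneg]
  constructor
  · rintro ⟨x, hx, hxpos⟩
    obtain ⟨e, he, rfl⟩ := List.mem_map.mp hx
    obtain ⟨j, hj, rfl⟩ := (PySem.List.mem_enumerate_iff _ _ _).mp he
    simp only [wgt, zero_add] at hxpos
    by_cases hv : 0 < l[j]
    · rw [if_pos hv] at hxpos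
      have hjm : j < l.length := hj
      have hjle : j ≤ k ∧ (k : Int) < (j : Int) + l[j] := by
        rw [Int.min_def] at hxpos
        split_ifs at hxpos <;> omega
      unfold condExists
      rw [List.any_eq_true]
      refine ⟨j, by simp [List.mem_range]; omega, ?_⟩
      have hgd : l.getD j 0 = l[j] := List.getD_eq_getElem l 0 hj
      rw [hgd]
      simp only [decide_eq_true_eq]
      omega
    · rw [if_neg hv] at hxpos; omega
  · intro hc
    unfold condExists at hc
    rw [List.any_eq_true] at hc
    obtain ⟨j, hjmem, hjc⟩ := hc
    have hjk : j < k + 1 := List.mem_range.mp hjmem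
    have hjl : j < l.length := by omega
    have hgd : l.getD j 0 = l[j] := List.getD_eq_getElem l 0 hjl
    rw [hgd] at hjc
    have hjc' : (k : Int) < (j : Int) + l[j] := by simpa using hjc
    refine ⟨wgt m ((j:Int), l[j]) (k + 1), List.mem_map.mpr ⟨((j:Int), l[j]), ?_, rfl⟩, ?_⟩
    · exact (PySem.List.mem_enumerate_iff _ _ _).mpr ⟨j, hjl, by simp⟩
    · have hv : 0 < l[j] := by omega
      simp only [wgt, if_pos hv, Int.min_def]
      split_ifs <;> omega

-- A's bit list equals B's bit list
theorem bits_eq (l : List Int) :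
    spineA l 0 =
      ((List.range l.length).foldl
        (scanStep ((PySem.List.enumerate l 0).foldl (diffStep l.length) (List.replicate (l.length + 1) 0))) (0, [])).2 := by
  set D := (PySem.List.enumerate l 0).foldl (diffStep l.length) (List.replicate (l.length + 1) 0) with hD
  rw [foldScan, List.nil_append, List.range_eq_range', scanList_range' D l.length 0 0 (by simp [preSum])]
  apply List.ext_getElem?
  intro k
  by_cases hk : k < l.length
  · rw [spineA_get l 0 k hk le_rfl]
    rw [List.getElem?_map]
    rw [List.getElem?_range' (by simpa using hk)]
    simp only [Option.map_some, zero_add, one_mul]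
    have hor : ((k : Int) < 0 || condExists l k) = condExists l k := by
      have : ¬ ((k:Int) < 0) := by omega
      simp [this]
    rw [hor]
    by_cases hc : condExists l k = true
    · rw [if_pos hc, hD, if_pos ((preSum_diff_pos_iff l k hk).mpr hc)]
    · rw [if_neg hc, hD, if_neg (fun hp => hc ((preSum_diff_pos_iff l k hk).mp hp))]
  · have h1 : (spineA l 0).length ≤ k := by rw [spineA_length]; omega
    have h2 : ((List.range' 0 l.length 1).map
        (fun k => if 0 < preSum D (k + 1) then "1" else "0")).length ≤ k := by
      simp; omega
    rw [List.getElem?_eq_none h1, List.getElem?_eq_none h2]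

-- ===== VERDICT (by name: the statement is the Claim_ definition above) =====
theorem solve_spec : Claim_equal_solve := by
  intro n arr _
  unfold Spec_solve solve solve_alt
  simp only []
  rw [foldA_acc arr.reverse 0 [], List.nil_append, bits_eq arr.reverse]
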